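-- pv_equiv track=rewrite | github.com/paulbaumgarten/advent-of-code | 2024/2024-09.py | locate_free_blocks
-- ===== SOURCE A (Python) =====
-- def locate_free_blocks(blocks, min_length=1):
--     start_of_free_space = -1
--     length_of_free_space = 0
--     for i in range(0, len(blocks)):
--         if blocks[i] == None:
--             if start_of_free_space < 0:
--                 start_of_free_space = i
--                 length_of_free_space = 1
--             else:
--                 length_of_free_space += 1
--             if length_of_free_space >= min_length:
--                 return start_of_free_space
--         else:
--             start_of_free_space = -1
--             length_of_free_space = 0
--     return None
-- ===== SOURCE B (Python) =====
-- def locate_free_blocks(blocks, min_length=1):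
--     # Scan run-by-run with two pointers instead of per-element counters.
--     n = len(blocks)
--     i = 0
--     while i < n:
--         k = (blocks[i] == None)
--         j = i + 1
--         while j < n and (blocks[j] == None) == k:
--             j += 1
--         if k and j - i >= min_length:
--             return i
--         i = j
--     return None
-- ===== Notes on version B (the rewrite author's own statement) =====
-- stated objective: alternative
-- what changed: B scans the list run-by-run with a two-pointer loop (measure each maximal run of None/non-None, then jump over it), instead of A's per-element scan maintaining start/length counters that reset on every non-None element.
import Mathlib
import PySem

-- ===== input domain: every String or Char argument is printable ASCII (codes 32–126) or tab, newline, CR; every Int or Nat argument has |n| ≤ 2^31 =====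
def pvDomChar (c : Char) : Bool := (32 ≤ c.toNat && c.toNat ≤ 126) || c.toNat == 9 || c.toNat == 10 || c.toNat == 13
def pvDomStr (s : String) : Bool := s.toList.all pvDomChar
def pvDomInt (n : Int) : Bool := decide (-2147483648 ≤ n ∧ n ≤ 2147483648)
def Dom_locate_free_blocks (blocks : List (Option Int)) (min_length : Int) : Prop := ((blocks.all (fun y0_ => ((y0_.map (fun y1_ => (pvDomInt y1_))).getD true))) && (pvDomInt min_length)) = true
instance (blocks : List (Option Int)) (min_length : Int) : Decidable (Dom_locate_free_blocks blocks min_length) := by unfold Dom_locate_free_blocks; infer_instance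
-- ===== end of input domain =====

set_option maxRecDepth 8000


-- B replaces A's per-element scan with counters by a two-pointer run-by-run scan; return values proved identical on all inputs.

-- ===== PORT A =====
-- A's `for i in range(len(blocks))` with `blocks[i]` visits the elements in order;
-- ported as structural recursion over the list carrying the index i and the two counters.
def pvALoop (min_length : Int) : List (Option Int) → Int → Int → Int → Option Int
  | [], _, _, _ => none
  | b :: rest, i, start, len =>
    if b = none then
      let start' := if start < 0 then i else start
      let len'   := if start < 0 then 1 else len + 1
      if len' ≥ min_length then some start'
      else pvALoop min_length rest (i + 1) start' len'
    else pvALoop min_length rest (i + 1) (-1) 0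

def locate_free_blocks (blocks : List (Option Int)) (min_length : Int) : Option Int :=
  pvALoop min_length blocks 0 (-1) 0

-- ===== PORT B =====
-- inner loop `while j < n and (blocks[j] == None) == k: j += 1` (indices are always in range here,
-- so blocks[j] is ported as getD with an unreachable default)
def pvRunEnd (blocks : List (Option Int)) (k : Bool) (j : Nat) : Nat :=
  if _h : j < blocks.length then
    if (blocks.getD j none).isNone == k then pvRunEnd blocks k (j + 1) else j
  else j
  termination_by blocks.length - j

-- needed for termination of the outer loop (i advances to j ≥ i + 1)
theorem pvRunEnd_ge (blocks : List (Option Int)) (k : Bool) (j : Nat) :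
    j ≤ pvRunEnd blocks k j := by
  rw [pvRunEnd]
  split
  · split
    · exact le_trans (Nat.le_succ j) (pvRunEnd_ge blocks k (j + 1))
    · exact le_refl j
  · exact le_refl j
  termination_by blocks.length - j

-- outer `while i < n:` loop
def pvBOuter (blocks : List (Option Int)) (min_length : Int) (i : Nat) : Option Int :=
  if h : i < blocks.length then
    let k := (blocks.getD i none).isNone
    let j := pvRunEnd blocks k (i + 1)
    if k ∧ (j : Int) - (i : Int) ≥ min_length then some (i : Int)
    else pvBOuter blocks min_length j
  else none
  termination_by blocks.length - i
  decreasing_by have := pvRunEnd_ge blocks ((blocks.getD i none).isNone) (i + 1); omega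

def locate_free_blocks_alt (blocks : List (Option Int)) (min_length : Int) : Option Int :=
  pvBOuter blocks min_length 0

-- ===== PRECONDITION & SPEC =====
def Spec_locate_free_blocks (blocks : List (Option Int)) (min_length : Int) (out : Option Int) : Prop := out = locate_free_blocks_alt blocks min_length
instance (blocks : List (Option Int)) (min_length : Int) (out : Option Int) : Decidable (Spec_locate_free_blocks blocks min_length out) := by unfold Spec_locate_free_blocks; infer_instance

-- ===== CLAIM (what is proved, stated in full; the proofs are below) =====
def Claim_equal_locate_free_blocks : Prop := ∀ (blocks : List (Option Int)) (min_length : Int), Dom_locate_free_blocks blocks min_length → Spec_locate_free_blocks blocks min_length (locate_free_blocks blocks min_length)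

-- ===== LEMMAS AND PROOFS =====

-- proof-side model of B: the same run-by-run scan phrased on list suffixes
-- (pvRunExt counts the prefix of the tail matching the key; pvBLoop jumps run by run)
def pvRunExt (k : Bool) : List (Option Int) → Nat
  | [] => 0
  | x :: t => if x.isNone == k then pvRunExt k t + 1 else 0

theorem pvRunExt_le (k : Bool) (t : List (Option Int)) : pvRunExt k t ≤ t.length := by
  induction t with
  | nil => simp [pvRunExt]
  | cons x t ih => simp only [pvRunExt, List.length_cons]; split <;> omega

def pvBLoop (min_length : Int) : List (Option Int) → Int → Option Int
  | [], _ => none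
  | b :: t, idx =>
    let k := b.isNone
    let run : Nat := 1 + pvRunExt k t
    if k ∧ (run : Int) ≥ min_length then some idx
    else pvBLoop min_length (t.drop (pvRunExt k t)) (idx + run)
  termination_by l => l.length
  decreasing_by simp only [List.length_drop, List.length_cons]; have := pvRunExt_le (b.isNone) t; omega

-- the matching prefix counted by pvRunExt consists of elements whose isNone equals k
theorem pvRunExt_take (k : Bool) (t : List (Option Int)) :
    ∀ x ∈ t.take (pvRunExt k t), x.isNone = k := by
  induction t with
  | nil => simp
  | cons x t ih =>
    simp only [pvRunExt]
    split
    · rename_i h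
      intro y hy
      simp only [List.take_succ_cons, List.mem_cons] at hy
      rcases hy with rfl | hy
      · simpa using h
      · exact ih y hy
    · simp

-- after the prefix, the first remaining element (if any) has the other key
theorem pvRunExt_drop (k : Bool) (t : List (Option Int)) :
    t.drop (pvRunExt k t) = [] ∨
      ∃ c r, t.drop (pvRunExt k t) = c :: r ∧ c.isNone ≠ k := by
  induction t with
  | nil => simp [pvRunExt]
  | cons x t ih =>
    simp only [pvRunExt]
    split
    · simpa using ih
    · rename_i h
      right; exact ⟨x, t, rfl, by simpa using h⟩

-- the index-based inner loop computes start + (matching-prefix length of the suffix)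
theorem pvRunEnd_eq (blocks : List (Option Int)) (k : Bool) (j : Nat) :
    pvRunEnd blocks k j = j + pvRunExt k (blocks.drop j) := by
  rw [pvRunEnd]
  split
  · rename_i h
    rw [List.drop_eq_getElem_cons h]
    simp only [pvRunExt, List.getD_eq_getElem blocks none h]
    split
    · rw [pvRunEnd_eq blocks k (j + 1)]
      omega
    · omega
  · rename_i h
    rw [List.drop_eq_nil_of_le (by omega)]
    simp [pvRunExt]
  termination_by blocks.length - j

-- the index-based outer loop equals the suffix-based scan
theorem pvBOuter_eq (blocks : List (Option Int)) (m : Int) (i : Nat) :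
    pvBOuter blocks m i = pvBLoop m (blocks.drop i) i := by
  rw [pvBOuter]
  split
  · rename_i h
    conv_rhs => rw [List.drop_eq_getElem_cons h]
    rw [pvBLoop]
    simp only [List.getD_eq_getElem blocks none h, pvRunEnd_eq blocks _ (i + 1),
      List.drop_drop]
    set k := blocks[i].isNone
    set e := pvRunExt k (blocks.drop (i + 1))
    by_cases hk : k = true
    · by_cases hge : ((1 + e : Nat) : Int) ≥ m
      · rw [if_pos ⟨hk, by push_cast at hge ⊢; omega⟩, if_pos ⟨hk, hge⟩]
      · rw [if_neg (by push_cast at hge ⊢; intro hc; exact hge (by omega)),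
          if_neg (by exact fun hc => hge hc.2)]
        rw [pvBOuter_eq blocks m (i + 1 + e)]
        congr 1
        push_cast
        ring
    · rw [if_neg (fun hc => hk hc.1), if_neg (fun hc => hk hc.1)]
      rw [pvBOuter_eq blocks m (i + 1 + e)]
      congr 1
      push_cast
      ring
  · rename_i h
    rw [List.drop_eq_nil_of_le (by omega), pvBLoop]
  termination_by blocks.length - i
  decreasing_by all_goals omega

-- A's loop over a run of non-None elements: the counters just reset all along
theorem aLoop_someRun (m : Int) (g : List (Option Int)) :
    ∀ rest j, (∀ x ∈ g, x.isNone = false) →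
      pvALoop m (g ++ rest) j (-1) 0 = pvALoop m rest (j + g.length) (-1) 0 := by
  induction g with
  | nil => intro rest j _; simp
  | cons x g ih =>
    intro rest j h
    have hx : x ≠ none := by
      have := h x (by simp); cases x <;> simp_all
    simp only [List.cons_append, pvALoop, if_neg hx]
    rw [ih rest (j + 1) (fun y hy => h y (by simp [hy]))]
    congr 1
    simp only [List.length_cons]
    push_cast
    ring

-- A's loop inside a run of None elements, with the start already fixed at s ≥ 0
theorem aLoop_noneRun (m : Int) (g : List (Option Int)) :
    ∀ rest j s len, (∀ x ∈ g, x = none) → 0 ≤ s → len < m →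
      pvALoop m (g ++ rest) j s len =
        if len + (g.length : Int) ≥ m ∧ 0 < g.length then some s
        else pvALoop m rest (j + g.length) s (len + g.length) := by
  induction g with
  | nil => intro rest j s len _ _ hlen; simp
  | cons x g ih =>
    intro rest j s len h hs hlen
    have hx : x = none := h x (by simp)
    subst hx
    have hns : ¬ s < 0 := by omega
    rw [List.cons_append,
      show pvALoop m (none :: (g ++ rest)) j s len =
          (if len + 1 ≥ m then some s else pvALoop m (g ++ rest) (j + 1) s (len + 1))
        from by simp [pvALoop, hns],
      List.length_cons]
    by_cases hstop : len + 1 ≥ m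
    · rw [if_pos hstop]
      split_ifs with h2
      · rfl
      · exfalso; push_cast at h2; omega
    · rw [if_neg hstop,
        ih rest (j + 1) s (len + 1) (fun y hy => h y (by simp [hy])) hs (by omega)]
      split_ifs with h1 h2 h2
      · rfl
      · exfalso; push_cast at h1 h2; omega
      · exfalso; push_cast at h1 h2; omega
      · congr 1 <;> push_cast <;> ring

-- when the next element is non-None (or the list is empty), the carried counters don't matter
theorem aLoop_reset (m : Int) (rest : List (Option Int)) (j s len : Int)
    (h : rest = [] ∨ ∃ c r, rest = c :: r ∧ c.isNone ≠ true) :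
    pvALoop m rest j s len = pvALoop m rest j (-1) 0 := by
  rcases h with rfl | ⟨c, r, rfl, hc⟩
  · rfl
  · have hcn : c ≠ none := by cases c <;> simp_all
    simp [pvALoop, if_neg hcn]

theorem main_aux (m : Int) : ∀ (n : Nat) (blocks : List (Option Int)), blocks.length ≤ n →
    ∀ j, 0 ≤ j → pvALoop m blocks j (-1) 0 = pvBLoop m blocks j := by
  intro n
  induction n with
  | zero =>
    intro blocks h j _
    have : blocks = [] := List.length_eq_zero_iff.mp (Nat.le_zero.mp h)
    subst this
    simp [pvALoop, pvBLoop]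
  | succ n ih =>
    intro blocks h j hj
    match blocks with
    | [] => simp [pvALoop, pvBLoop]
    | b :: t =>
      set k := b.isNone with hk
      set e := pvRunExt k t with he
      have hel : e ≤ t.length := pvRunExt_le k t
      have hsplit : t = t.take e ++ t.drop e := (List.take_append_drop e t).symm
      have hrest := pvRunExt_drop k t
      have hIH : ∀ j', 0 ≤ j' → pvALoop m (t.drop e) j' (-1) 0 = pvBLoop m (t.drop e) j' := by
        intro j' hj'
        refine ih (t.drop e) ?_ j' hj'
        simp only [List.length_cons] at h
        simp only [List.length_drop]
        omega
      have hlen_take : (t.take e).length = e := by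
        simp [List.length_take, Nat.min_eq_left hel]
      rw [show pvBLoop m (b :: t) j =
          if k ∧ ((1 + e : Nat) : Int) ≥ m then some j
          else pvBLoop m (t.drop e) (j + ((1 + e : Nat) : Int)) from by rw [pvBLoop]]
      cases b with
      | some v =>
        have hk' : k = false := by simp [hk]
        rw [if_neg (by simp [hk'])]
        conv_lhs => rw [show ((some v :: t : List (Option Int))) = (some v :: t.take e) ++ t.drop e
          from by rw [List.cons_append, ← hsplit]]
        rw [aLoop_someRun m (some v :: t.take e) (t.drop e) j ?_, hIH _ (by positivity)]
        · congr 1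
          simp only [List.length_cons, hlen_take]
          push_cast
          ring
        · intro x hx
          rcases List.mem_cons.mp hx with rfl | hx
          · simp
          · have := pvRunExt_take k (t := t) x hx
            rw [this, hk']
      | none =>
        have hk' : k = true := by simp [hk]
        have hg : ∀ x ∈ t.take e, x = none := by
          intro x hx
          have := pvRunExt_take k (t := t) x hx
          rw [hk'] at this
          exact Option.isNone_iff_eq_none.mp this
        rw [show pvALoop m (none :: t) j (-1) 0 =
            (if (1 : Int) ≥ m then some j else pvALoop m t (j + 1) j 1)
          from by simp [pvALoop]]
        by_cases h1 : (1 : Int) ≥ m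
        · rw [if_pos h1,
            if_pos (show k = true ∧ ((1 + e : Nat) : Int) ≥ m from ⟨hk', by push_cast; omega⟩)]
        · rw [if_neg h1]
          conv_lhs => rw [hsplit]
          rw [aLoop_noneRun m (t.take e) (t.drop e) (j + 1) j 1 hg hj (by omega),
            hlen_take]
          rw [aLoop_reset m (t.drop e) (j + 1 + (e : Int)) j (1 + (e : Int)) ?_, hIH _ (by positivity)]
          · by_cases hc : (1 : Int) + (e : Int) ≥ m
            · rw [if_pos (show (1 : Int) + (e : Int) ≥ m ∧ 0 < e from ⟨hc, by omega⟩),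
                if_pos (show k = true ∧ ((1 + e : Nat) : Int) ≥ m from ⟨hk', by push_cast; omega⟩)]
            · rw [if_neg (show ¬((1 : Int) + (e : Int) ≥ m ∧ 0 < e) from by omega),
                if_neg (show ¬(k = true ∧ ((1 + e : Nat) : Int) ≥ m) from by
                  simp only [hk', true_and]; push_cast; omega)]
              congr 1
              push_cast
              ring
          · rcases hrest with hnil | ⟨c, r, hcr, hck⟩
            · left; exact hnil
            · right; exact ⟨c, r, hcr, by rw [hk'] at hck; simpa using hck⟩

-- ===== VERDICT (by name: the statement is the Claim_ definition above) =====
theorem locate_free_blocks_spec : Claim_equal_locate_free_blocks := by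
  intro blocks min_length _
  unfold Spec_locate_free_blocks locate_free_blocks locate_free_blocks_alt
  rw [pvBOuter_eq blocks min_length 0]
  simpa using main_aux min_length blocks.length blocks le_rfl 0 le_rfl
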